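-- pv_equiv track=rewrite | github.com/reyavir/hierarchical-context-compressor | src/main.py | _prune_sections
-- ===== SOURCE A (Python) =====
-- from typing import Dict, List, Optional
--
-- def _prune_sections(md: str) -> str:
--     """
--     Drop whole sections (## Heading ...) that don't provide a unique signal after
--     generic bullets are removed. A section is kept if it has either:
--     - at least one backticked reference, or
--     - at least 2 non-empty lines of content.
--     """
--     lines = md.split("\n")
--     n = len(lines)
--     # Find indices of level-2 headings
--     heading_idxs: List[int] = [i for i, line in enumerate(lines) if line.startswith("## ")]
--     if not heading_idxs:
--         return md
--
--     new_lines: List[str] = []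
--     # Keep everything before the first heading as-is
--     first_idx = heading_idxs[0]
--     new_lines.extend(lines[:first_idx])
--
--     for idx, h_start in enumerate(heading_idxs):
--         h_end = heading_idxs[idx + 1] if idx + 1 < len(heading_idxs) else n
--         heading_line = lines[h_start]
--         body_lines = lines[h_start + 1 : h_end]
--         body_text = "\n".join(body_lines).strip()
--         if not body_text:
--             # Empty body: drop this section
--             continue
--         # Evaluate signal
--         has_backtick = "`" in body_text
--         nonempty = [l for l in body_lines if l.strip()]
--         has_substance = len(nonempty) >= 2
--         if not has_backtick and not has_substance:
--             # No concrete reference and basically nothing there: drop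
--             continue
--         # Keep section
--         new_lines.append(heading_line)
--         new_lines.extend(body_lines)
--
--     return "\n".join(new_lines).rstrip()
-- ===== SOURCE B (Python) =====
-- def _keep(body_lines):
--     body_text = "\n".join(body_lines).strip()
--     return bool(body_text) and ("`" in body_text or len([l for l in body_lines if l.strip()]) >= 2)
--
-- def _prune_sections(md: str) -> str:
--     lines = md.split("\n")
--     if not any(l.startswith("## ") for l in lines):
--         return md
--     out = []
--     cur = None  # (heading, body_lines) of the section being buffered
--     for line in lines:
--         if line.startswith("## "):
--             if cur is not None:
--                 h, b = cur
--                 if _keep(b):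
--                     out.append(h)
--                     out.extend(b)
--             cur = (line, [])
--         elif cur is None:
--             out.append(line)
--         else:
--             cur[1].append(line)
--     h, b = cur
--     if _keep(b):
--         out.append(h)
--         out.extend(b)
--     return "\n".join(out).rstrip()
-- ===== Notes on version B (the rewrite author's own statement) =====
-- stated objective: alternative
-- what changed: A collects all level-2 heading indices first and then slices the line list between consecutive indices in a second indexed loop; B makes a single streaming pass over the lines, buffering the current section and flushing it (through the same keep test) when the next heading or the end of input is reached.
import Mathlib
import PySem

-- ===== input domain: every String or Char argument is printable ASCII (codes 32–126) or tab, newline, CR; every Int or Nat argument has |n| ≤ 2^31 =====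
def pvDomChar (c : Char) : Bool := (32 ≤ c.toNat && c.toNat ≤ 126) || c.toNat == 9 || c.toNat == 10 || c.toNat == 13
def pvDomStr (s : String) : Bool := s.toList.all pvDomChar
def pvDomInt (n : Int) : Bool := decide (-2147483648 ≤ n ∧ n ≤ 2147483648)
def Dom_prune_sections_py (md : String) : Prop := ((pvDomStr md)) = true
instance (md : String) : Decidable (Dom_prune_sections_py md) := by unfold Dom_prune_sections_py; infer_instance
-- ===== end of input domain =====

-- B replaces A's two-pass index-and-slice scheme (collect heading indices, then slice the line list
-- between consecutive indices) with a single streaming pass over the lines that buffers the current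
-- section and flushes it at the next heading / at the end; objective: alternative decomposition.

-- ===== PORT A =====
-- A-side helper: the body of A's `for idx, h_start in enumerate(heading_idxs)` loop, step for step.
def pvABody (lines : List String) (heading_idxs : List Int) (n : Int)
    (new_lines : List String) (p : Int × Int) : List String :=
  let idx := p.1
  let h_start := p.2
  let h_end := if idx + 1 < (heading_idxs.length : Int) then PySem.List.pyGetD heading_idxs (idx + 1) 0 else n
  let heading_line := PySem.List.pyGetD lines h_start ""
  let body_lines := PySem.List.slice lines (some (h_start + 1)) (some h_end)
  let body_text := PySem.Str.strip (PySem.Str.join "\n" body_lines)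
  if body_text = "" then new_lines                                   -- empty body: drop
  else
    let has_backtick := PySem.Str.isIn "`" body_text
    let nonempty := body_lines.filter (fun l => !(PySem.Str.strip l == ""))
    let has_substance := decide (nonempty.length ≥ 2)
    if !has_backtick && !has_substance then new_lines                -- no signal: drop
    else new_lines ++ [heading_line] ++ body_lines                   -- keep section

def prune_sections_py (md : String) : String :=
  let lines := (PySem.Str.split? md "\n").getD []   -- sep "\n" ≠ "": split? is always `some` here
  let n : Int := lines.length
  let heading_idxs : List Int :=
    (PySem.List.enumerate lines 0).filterMap
      (fun p => if PySem.Str.startswith p.2 "## " then some p.1 else none)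
  if heading_idxs = [] then md
  else
    let first_idx := heading_idxs.headD 0           -- heading_idxs[0]; list nonempty here
    let new_lines : List String := PySem.List.slice lines none (some first_idx)
    let new_lines := (PySem.List.enumerate heading_idxs 0).foldl (pvABody lines heading_idxs n) new_lines
    PySem.Str.rstrip (PySem.Str.join "\n" new_lines)

-- ===== PORT B =====
-- B-side helpers: keep test for a buffered section body, flush, and the streaming pass.
def pvKeep (body_lines : List String) : Bool :=
  let body_text := PySem.Str.strip (PySem.Str.join "\n" body_lines)
  !(body_text == "") && (PySem.Str.isIn "`" body_text
      || decide ((body_lines.filter (fun l => !(PySem.Str.strip l == ""))).length ≥ 2))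

def pvFlush (out : List String) (h : String) (b : List String) : List String :=
  if pvKeep b then out ++ h :: b else out

def pvGo : List String → List String → Option (String × List String) → List String
  | [], out, none => out
  | [], out, some (h, b) => pvFlush out h b
  | l :: ls, out, cur =>
    if PySem.Str.startswith l "## " then
      match cur with
      | none => pvGo ls out (some (l, []))
      | some (h, b) => pvGo ls (pvFlush out h b) (some (l, []))
    else
      match cur with
      | none => pvGo ls (out ++ [l]) none
      | some (h, b) => pvGo ls out (some (h, b ++ [l]))

def prune_sections_py_alt (md : String) : String :=
  let lines := (PySem.Str.split? md "\n").getD []   -- sep "\n" ≠ "": split? is always `some` here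
  if lines.any (fun l => PySem.Str.startswith l "## ") then
    PySem.Str.rstrip (PySem.Str.join "\n" (pvGo lines [] none))
  else md

-- ===== PRECONDITION & SPEC =====
def Spec_prune_sections_py (md : String) (out : String) : Prop := out = prune_sections_py_alt md
instance (md : String) (out : String) : Decidable (Spec_prune_sections_py md out) := by unfold Spec_prune_sections_py; infer_instance

-- ===== CLAIM (what is proved, stated in full; the proofs are below) =====
def Claim_equal_prune_sections_py : Prop := ∀ (md : String), Dom_prune_sections_py md → Spec_prune_sections_py md (prune_sections_py md)

-- ===== LEMMAS AND PROOFS =====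

-- `heading` predicate and proof-only helpers
def pvNH (l : String) : Bool := !PySem.Str.startswith l "## "

def pvFlush1 (h : String) (b : List String) : List String := if pvKeep b then h :: b else []

def pvSpecGo : List String → List String
  | [] => []
  | h :: rest =>
      pvFlush1 h (rest.takeWhile pvNH) ++ pvSpecGo (rest.dropWhile pvNH)
termination_by ls => ls.length
decreasing_by
  simp only [List.length_cons]
  have := List.length_dropWhile_le pvNH rest
  omega

-- heading indices of a suffix, with absolute positions
def pvIdxs : Int → List String → List Int
  | _, [] => []
  | p, l :: ls => if PySem.Str.startswith l "## " then p :: pvIdxs (p + 1) ls else pvIdxs (p + 1) ls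

-- consecutive pairs (h_start, h_end)
def pvPairs (hs : List Int) (n : Int) : List (Int × Int) := hs.zip (hs.drop 1 ++ [n])

-- A's loop body in (h_start, h_end) form
def pvStep (lines : List String) (acc : List String) (se : Int × Int) : List String :=
  acc ++ pvFlush1 (PySem.List.pyGetD lines se.1 "") (PySem.List.slice lines (some (se.1 + 1)) (some se.2))

theorem pvABody_eq_step (lines : List String) (hs : List Int) (n : Int) (acc : List String)
    (idx h_start : Int) :
    pvABody lines hs n acc (idx, h_start) =
      pvStep lines acc (h_start, if idx + 1 < (hs.length : Int) then PySem.List.pyGetD hs (idx + 1) 0 else n) := by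
  
  simp only [pvABody, pvStep, pvFlush1, pvKeep]
  set e := (if idx + 1 < (hs.length : Int) then PySem.List.pyGetD hs (idx + 1) 0 else n) with he
  set bl := PySem.List.slice lines (some (h_start + 1)) (some e) with hbl
  set bt := PySem.Str.strip (PySem.Str.join "\n" bl) with hbt
  by_cases h0 : bt = ""
  · simp [h0]
  · cases h1 : PySem.Str.isIn "`" bt <;>
      cases h2 : decide ((bl.filter (fun l => !(PySem.Str.strip l == ""))).length ≥ 2) <;>
      simp [h0]

theorem pvEnum_filterMap (ls : List String) (p : Int) :
    (PySem.List.enumerate ls p).filterMap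
      (fun q => if PySem.Str.startswith q.2 "## " then some q.1 else none) = pvIdxs p ls := by
  
  induction ls generalizing p with
  | nil => simp [PySem.List.enumerate_nil, pvIdxs]
  | cons l ls ih =>
    rw [PySem.List.enumerate_cons, List.filterMap_cons]
    cases h : PySem.Str.startswith l "## "
    · simp only [Bool.false_eq_true, if_false]
      simp only [pvIdxs, h, Bool.false_eq_true, if_false]
      exact ih (p + 1)
    · simp only [if_true]
      simp only [pvIdxs, h, if_true]
      exact congrArg _ (ih (p + 1))

theorem pvIdxs_nil_iff (ls : List String) (p : Int) :
    pvIdxs p ls = [] ↔ ls.any (fun l => PySem.Str.startswith l "## ") = false := by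
  
  induction ls generalizing p with
  | nil => simp [pvIdxs]
  | cons l ls ih =>
    rw [List.any_cons]
    cases h : PySem.Str.startswith l "## "
    · simp only [pvIdxs, h, Bool.false_eq_true, if_false, Bool.false_or]
      exact ih (p + 1)
    · simp only [pvIdxs, h, if_true, Bool.true_or]
      simp

theorem pvIdxs_shift (ls : List String) (r : Nat) :
    pvIdxs (r : Int) ls = pvIdxs ((r + (ls.takeWhile pvNH).length : Nat) : Int) (ls.dropWhile pvNH) := by
  
  induction ls generalizing r with
  | nil => simp
  | cons l ls ih =>
    rw [List.takeWhile_cons, List.dropWhile_cons]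
    cases h : PySem.Str.startswith l "## "
    · have hnh : pvNH l = true := by simp only [pvNH, h, Bool.not_false]
      simp only [hnh, h, pvIdxs, Bool.false_eq_true, if_false, if_true,
        List.length_cons]
      have h1 : ((r : Int) + 1) = ((r + 1 : Nat) : Int) := by push_cast; ring
      rw [h1, ih (r + 1)]
      have h2 : r + 1 + (ls.takeWhile pvNH).length = r + ((ls.takeWhile pvNH).length + 1) := by
        omega
      rw [h2]
    · have hnh : pvNH l = false := by simp only [pvNH, h, Bool.not_true]
      simp [hnh]

theorem pvDropWhile_head (ls d' : List String) (m : String)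
    (h : ls.dropWhile pvNH = m :: d') : PySem.Str.startswith m "## " = true := by
  
  induction ls with
  | nil => simp at h
  | cons l ls ih =>
    rw [List.dropWhile_cons] at h
    cases hl : PySem.Str.startswith l "## "
    · have hnh : pvNH l = true := by simp only [pvNH, hl, Bool.not_false]
      rw [hnh] at h
      exact ih (by simpa using h)
    · have hnh : pvNH l = false := by simp only [pvNH, hl, Bool.not_true]
      rw [hnh] at h
      simp only [Bool.false_eq_true, if_false, List.cons.injEq] at h
      rw [← h.1]; exact hl

-- enumerate-with-lookup fold = fold over consecutive pairs
theorem pvZ (lines : List String) (hs : List Int) (n : Int) :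
    ∀ (t : List Int) (k : Nat) (acc : List String), t = hs.drop k →
      t.length + k = hs.length →
      (PySem.List.enumerate t (k : Int)).foldl (pvABody lines hs n) acc =
        (pvPairs t n).foldl (pvStep lines) acc := by
  
  intro t
  induction t with
  | nil => intro k acc _ _; simp [PySem.List.enumerate_nil, pvPairs]
  | cons x t ih =>
    intro k acc hdrop hlen
    rw [PySem.List.enumerate_cons, List.foldl_cons, pvABody_eq_step]
    have hk1 : ((k : Int) + 1) = ((k + 1 : Nat) : Int) := by push_cast; ring
    have hdrop' : hs.drop (k + 1) = t := by
      rw [← List.tail_drop, ← hdrop]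
      rfl
    cases t with
    | nil =>
      have hcond : ¬ ((k : Int) + 1 < (hs.length : Int)) := by
        simp only [List.length_cons, List.length_nil] at hlen
        omega
      rw [if_neg hcond]
      simp [PySem.List.enumerate_nil, pvPairs]
    | cons y t' =>
      have hlen' : k + 2 + t'.length = hs.length := by
        simp only [List.length_cons] at hlen
        omega
      have hcond : ((k : Int) + 1 < (hs.length : Int)) := by
        omega
      have hy : PySem.List.pyGetD hs ((k : Int) + 1) 0 = y := by
        rw [hk1, PySem.List.pyGetD_natCast]
        have h0 : hs[k + 1]? = some y := by
          have h1 : (hs.drop (k + 1))[0]? = some y := by rw [hdrop']; rfl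
          rw [List.getElem?_drop] at h1
          simpa using h1
        simp [List.getD_eq_getElem?_getD, h0]
      rw [if_pos hcond, hy]
      have hpp : pvPairs (x :: y :: t') n = (x, y) :: pvPairs (y :: t') n := rfl
      rw [hpp, List.foldl_cons, hk1]
      exact ih (k + 1) _ hdrop'.symm (by simp only [List.length_cons]; omega)

-- the main A-side characterisation
theorem pvM (lines : List String) :
    ∀ (ls : List String) (p : Nat) (acc : List String), ls = lines.drop p →
      (pvPairs (pvIdxs (p : Int) ls) (lines.length : Int)).foldl (pvStep lines) acc =
        acc ++ pvSpecGo (ls.dropWhile pvNH) := by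
  
  intro ls
  induction ls with
  | nil => intro p acc _; simp [pvIdxs, pvPairs, pvSpecGo]
  | cons l ls ih =>
    intro p acc hdrop
    have hdropl : lines.drop (p + 1) = ls := by
      rw [← List.tail_drop, ← hdrop]
      rfl
    have hget : PySem.List.pyGetD lines (p : Int) "" = l := by
      rw [PySem.List.pyGetD_natCast]
      have h0 : lines[p]? = some l := by
        have h1 : (lines.drop p)[0]? = some l := by rw [← hdrop]; rfl
        rw [List.getElem?_drop] at h1
        simpa using h1
      simp [List.getD_eq_getElem?_getD, h0]
    have hp1 : ((p : Int) + 1) = ((p + 1 : Nat) : Int) := by push_cast; ring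
    cases hl : PySem.Str.startswith l "## "
    · have hnh : pvNH l = true := by simp only [pvNH, hl, Bool.not_false]
      simp only [pvIdxs, hl, Bool.false_eq_true, if_false, List.dropWhile_cons, hnh, if_true]
      rw [hp1]
      exact ih (p + 1) acc hdropl.symm
    · have hnh : pvNH l = false := by simp only [pvNH, hl, Bool.not_true]
      simp only [pvIdxs, hl, if_true, List.dropWhile_cons, hnh, Bool.false_eq_true, if_false]
      rw [pvSpecGo, hp1]
      have hshift := pvIdxs_shift ls (p + 1)
      rcases hd : ls.dropWhile pvNH with _ | ⟨m, d'⟩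
      · have hall : ls.takeWhile pvNH = ls := by
          conv_rhs => rw [← List.takeWhile_append_dropWhile (p := pvNH) (l := ls)]
          rw [hd, List.append_nil]
        have hhs : pvIdxs ((p + 1 : Nat) : Int) ls = [] := by
          rw [hshift, hd]
          rfl
        rw [hhs]
        show List.foldl (pvStep lines) acc [(((p : Nat) : Int), (lines.length : Int))] = _
        rw [List.foldl_cons, List.foldl_nil, pvStep]
        simp only [hget, hp1]
        rw [PySem.List.slice_toNat lines (by positivity) (by positivity)]
        simp only [Int.toNat_natCast, hdropl]
        have hlen2 : ls.length = lines.length - (p + 1) := by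
          rw [← hdropl, List.length_drop]
        rw [← hlen2, List.take_length]
        rw [hall]
        simp [pvSpecGo]
      · have hm : PySem.Str.startswith m "## " = true := pvDropWhile_head ls d' m hd
        have hhs : pvIdxs ((p + 1 : Nat) : Int) ls =
            ((p + 1 + (ls.takeWhile pvNH).length : Nat) : Int) ::
              pvIdxs (((p + 1 + (ls.takeWhile pvNH).length : Nat) : Int) + 1) d' := by
          rw [hshift, hd]
          simp only [pvIdxs, hm, if_true]
        rw [hhs]
        show List.foldl (pvStep lines)
            (pvStep lines acc (((p : Nat) : Int), ((p + 1 + (ls.takeWhile pvNH).length : Nat) : Int)))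
            (pvPairs (((p + 1 + (ls.takeWhile pvNH).length : Nat) : Int) ::
              pvIdxs (((p + 1 + (ls.takeWhile pvNH).length : Nat) : Int) + 1) d') (lines.length : Int)) = _
        rw [← hhs, ih (p + 1) _ hdropl.symm, hd]
        have hstep : pvStep lines acc (((p : Nat) : Int), ((p + 1 + (ls.takeWhile pvNH).length : Nat) : Int))
            = acc ++ pvFlush1 l (ls.takeWhile pvNH) := by
          rw [pvStep]
          simp only [hget, hp1]
          rw [PySem.List.slice_toNat lines (by positivity) (by positivity)]
          simp only [Int.toNat_natCast, hdropl]
          have harith : p + 1 + (ls.takeWhile pvNH).length - (p + 1) = (ls.takeWhile pvNH).length := by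
            omega
          rw [harith]
          rw [(List.prefix_iff_eq_take.mp (List.takeWhile_prefix pvNH)).symm]
        rw [hstep]
        simp

theorem pvFlush_eq (out : List String) (h : String) (b : List String) :
    pvFlush out h b = out ++ pvFlush1 h b := by
  unfold pvFlush pvFlush1
  split <;> simp

theorem pvGo_some (ls : List String) :
    ∀ (out : List String) (h : String) (b : List String),
      pvGo ls out (some (h, b)) =
        out ++ pvFlush1 h (b ++ ls.takeWhile pvNH) ++ pvSpecGo (ls.dropWhile pvNH) := by
  
  induction ls with
  | nil =>
    intro out h b
    simp [pvGo, pvFlush_eq, pvSpecGo]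
  | cons l ls ih =>
    intro out h b
    cases hl : PySem.Str.startswith l "## "
    · have hnh : pvNH l = true := by simp only [pvNH, hl, Bool.not_false]
      simp only [pvGo, hl, Bool.false_eq_true, if_false, List.takeWhile_cons, List.dropWhile_cons,
        hnh, if_true]
      rw [ih]
      simp
    · have hnh : pvNH l = false := by simp only [pvNH, hl, Bool.not_true]
      simp only [pvGo, hl, if_true, List.takeWhile_cons, List.dropWhile_cons, hnh,
        Bool.false_eq_true, if_false]
      rw [ih, pvFlush_eq, pvSpecGo]
      simp

theorem pvGo_none (ls : List String) :
    ∀ (out : List String),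
      pvGo ls out none = out ++ ls.takeWhile pvNH ++ pvSpecGo (ls.dropWhile pvNH) := by
  
  induction ls with
  | nil =>
    intro out
    simp [pvGo, pvSpecGo]
  | cons l ls ih =>
    intro out
    cases hl : PySem.Str.startswith l "## "
    · have hnh : pvNH l = true := by simp only [pvNH, hl, Bool.not_false]
      simp only [pvGo, hl, Bool.false_eq_true, if_false, List.takeWhile_cons, List.dropWhile_cons,
        hnh, if_true]
      rw [ih]
      simp
    · have hnh : pvNH l = false := by simp only [pvNH, hl, Bool.not_true]
      simp only [pvGo, hl, if_true, List.takeWhile_cons, List.dropWhile_cons, hnh,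
        Bool.false_eq_true, if_false]
      rw [pvGo_some ls, pvSpecGo]
      simp

-- ===== VERDICT (by name: the statement is the Claim_ definition above) =====
theorem prune_sections_py_spec : Claim_equal_prune_sections_py := by
  
  intro md _
  unfold Spec_prune_sections_py
  simp only [prune_sections_py, prune_sections_py_alt]
  rw [pvEnum_filterMap]
  set lines := (PySem.Str.split? md "\n").getD [] with hlines
  cases hany : lines.any (fun l => PySem.Str.startswith l "## ")
  · have h0 : pvIdxs 0 lines = [] := (pvIdxs_nil_iff lines 0).mpr hany
    rw [h0, if_pos rfl]
    simp
  · have h0 : pvIdxs 0 lines ≠ [] := by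
      intro h
      rw [pvIdxs_nil_iff lines 0] at h
      rw [hany] at h
      cases h
    rw [if_neg h0, if_pos rfl]
    have hz0 : ((0 : Nat) : Int) = (0 : Int) := by norm_num
    have hsh := pvIdxs_shift lines 0
    rw [hz0, Nat.zero_add] at hsh
    rcases hd : lines.dropWhile pvNH with _ | ⟨m, d'⟩
    · exfalso
      apply h0
      rw [hsh, hd]
      rfl
    · have hm : PySem.Str.startswith m "## " = true := pvDropWhile_head lines d' m hd
      have hhs : pvIdxs (0 : Int) lines =
          (((lines.takeWhile pvNH).length : Nat) : Int) ::
            pvIdxs ((((lines.takeWhile pvNH).length : Nat) : Int) + 1) d' := by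
        rw [hsh, hd]
        simp only [pvIdxs, hm, if_true]
      have hhead : (pvIdxs (0 : Int) lines).headD 0 = (((lines.takeWhile pvNH).length : Nat) : Int) := by
        rw [hhs]
        rfl
      have hinit : PySem.List.slice lines none (some ((pvIdxs (0 : Int) lines).headD 0)) =
          lines.takeWhile pvNH := by
        rw [hhead, PySem.List.slice_to lines (by positivity)]
        rw [Int.toNat_natCast]
        exact (List.prefix_iff_eq_take.mp (List.takeWhile_prefix pvNH)).symm
      rw [hinit]
      have hz := pvZ lines (pvIdxs (0 : Int) lines) (lines.length : Int)
        (pvIdxs (0 : Int) lines) 0 (lines.takeWhile pvNH) (by rw [List.drop_zero]) (by simp)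
      rw [hz0] at hz
      rw [hz]
      have hm2 := pvM lines lines 0 (lines.takeWhile pvNH) (List.drop_zero (l := lines)).symm
      rw [hz0] at hm2
      rw [hm2, pvGo_none lines []]
      simp
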